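-- pv_equiv track=rewrite | github.com/Barbade22/transformer-toolkit | transformer_toolkit/sft_dataloader.py | _find_turn_boundaries
-- ===== SOURCE A (Python) =====
-- def _find_turn_boundaries(mask: list[int]) -> list[tuple[int, int, int]]:
--     if not mask:
--         return []
--     runs  = []
--     start = 0
--     cur   = mask[0]
--     for i in range(1, len(mask)):
--         if mask[i] != cur:
--             runs.append((start, i - 1, cur))
--             start = i
--             cur   = mask[i]
--     runs.append((start, len(mask) - 1, cur))
--     return runs
-- ===== SOURCE B (Python) =====
-- def _find_turn_boundaries(mask: list[int]) -> list[tuple[int, int, int]]: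
--     if not mask:
--         return []
--     n = len(mask)
--     bounds = [0] + [i for i in range(1, n) if mask[i] != mask[i - 1]] + [n]
--     return [(s, e - 1, mask[s]) for s, e in zip(bounds, bounds[1:])]
-- ===== Notes on version B (the rewrite author's own statement) =====
-- stated objective: alternative
-- what changed: Replaces A's accumulate-current-run-and-flush loop with a two-pass decomposition: first collect the boundary indices (0, every transition i with mask[i] != mask[i-1], and n), then pair consecutive boundaries into runs.
import Mathlib
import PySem

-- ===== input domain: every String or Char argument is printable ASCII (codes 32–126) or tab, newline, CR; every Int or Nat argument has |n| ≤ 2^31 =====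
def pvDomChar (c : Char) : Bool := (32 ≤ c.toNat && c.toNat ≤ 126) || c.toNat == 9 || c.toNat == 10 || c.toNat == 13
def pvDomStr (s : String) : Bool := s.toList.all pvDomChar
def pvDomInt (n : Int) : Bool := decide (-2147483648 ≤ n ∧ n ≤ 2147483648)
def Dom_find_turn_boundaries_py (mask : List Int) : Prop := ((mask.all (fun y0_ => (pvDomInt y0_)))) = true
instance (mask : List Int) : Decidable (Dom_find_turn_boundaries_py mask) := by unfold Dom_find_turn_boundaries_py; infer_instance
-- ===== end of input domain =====

-- B replaces A's accumulate-and-flush loop with a two-pass decomposition (collect boundary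
-- indices, then pair consecutive boundaries); same asymptotic cost, alternative structure.


-- ===== PORT A =====
def find_turn_boundaries_py (mask : List Int) : List (Int × Int × Int) :=
  if mask = [] then []
  else
    let st := (PySem.List.pyRange 1 (mask.length : Int) 1).foldl
      (fun (s : List (Int × Int × Int) × Int × Int) (i : Int) =>
        if PySem.List.pyGetD mask i 0 ≠ s.2.2 then
          (s.1 ++ [(s.2.1, i - 1, s.2.2)], i, PySem.List.pyGetD mask i 0)
        else s)
      ([], 0, PySem.List.pyGetD mask 0 0)
    st.1 ++ [(st.2.1, (mask.length : Int) - 1, st.2.2)]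

-- ===== PORT B =====
def find_turn_boundaries_py_alt (mask : List Int) : List (Int × Int × Int) :=
  if mask = [] then []
  else
    let n : Int := (mask.length : Int)
    let bounds : List Int :=
      0 :: ((PySem.List.pyRange 1 n 1).filter
        (fun i => PySem.List.pyGetD mask i 0 ≠ PySem.List.pyGetD mask (i - 1) 0) ++ [n])
    (bounds.zip bounds.tail).map
      (fun p => (p.1, p.2 - 1, PySem.List.pyGetD mask p.1 0))

-- ===== PRECONDITION & SPEC =====
def Spec_find_turn_boundaries_py (mask : List Int) (out : List (Int × Int × Int)) : Prop := out = find_turn_boundaries_py_alt mask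
instance (mask : List Int) (out : List (Int × Int × Int)) : Decidable (Spec_find_turn_boundaries_py mask out) := by unfold Spec_find_turn_boundaries_py; infer_instance

-- ===== CLAIM (what is proved, stated in full; the proofs are below) =====
def Claim_equal_find_turn_boundaries_py : Prop := ∀ (mask : List Int), Dom_find_turn_boundaries_py mask → Spec_find_turn_boundaries_py mask (find_turn_boundaries_py mask)

-- ===== LEMMAS AND PROOFS =====

-- run pairing used by B, for a fixed mask
def pvPairs (mask : List Int) (l : List Int) : List (Int × Int × Int) :=
  (l.zip l.tail).map (fun p => (p.1, p.2 - 1, PySem.List.pyGetD mask p.1 0))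

lemma pvPairs_cons_cons (mask : List Int) (a b : Int) (t : List Int) :
    pvPairs mask (a :: b :: t)
      = (a, b - 1, PySem.List.pyGetD mask a 0) :: pvPairs mask (b :: t) := by
  simp [pvPairs]

-- main loop invariant: A's fold from index k, flushed, equals the pairing of
-- start :: (transitions in [k, n)) ++ [n]
lemma pvMain (mask : List Int) (n : Int)
    (m : ℕ) (k start cur : Int) (runs : List (Int × Int × Int))
    (hm : m = (n - k).toNat)
    (hcs : cur = PySem.List.pyGetD mask start 0)
    (hcp : cur = PySem.List.pyGetD mask (k - 1) 0) :
    ((fun st => st.1 ++ [(st.2.1, n - 1, st.2.2)])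
      ((PySem.List.pyRange k n 1).foldl
        (fun (s : List (Int × Int × Int) × Int × Int) (i : Int) =>
          if PySem.List.pyGetD mask i 0 ≠ s.2.2 then
            (s.1 ++ [(s.2.1, i - 1, s.2.2)], i, PySem.List.pyGetD mask i 0)
          else s)
        (runs, start, cur)))
    = runs ++ pvPairs mask (start ::
        ((PySem.List.pyRange k n 1).filter
          (fun i => PySem.List.pyGetD mask i 0 ≠ PySem.List.pyGetD mask (i - 1) 0) ++ [n])) := by
  induction m generalizing k start cur runs with
  | zero =>
      have hnk : n ≤ k := by omega
      rw [PySem.List.pyRange_one_eq_nil hnk]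
      simp [pvPairs, hcs]
  | succ m ih =>
      have hkn : k < n := by omega
      rw [PySem.List.pyRange_one_cons hkn]
      simp only [List.foldl_cons, List.filter_cons, ← hcp]
      by_cases h : PySem.List.pyGetD mask k 0 = cur
      · -- no transition at k
        rw [if_neg (by simp [h]), if_neg (by simp [h])]
        exact ih (k + 1) start cur runs (by omega) hcs
          (by rw [show k + 1 - 1 = k by ring]; exact h.symm)
      · -- transition at k: flush current run, restart at k
        rw [if_pos (by simpa using h), if_pos (by simpa using h)]
        have hih := ih (k + 1) k (PySem.List.pyGetD mask k 0) (runs ++ [(start, k - 1, cur)])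
          (by omega) rfl (by rw [show k + 1 - 1 = k by ring])
        beta_reduce at hih
        rw [hih]
        rw [show (k :: List.filter (fun i => decide (PySem.List.pyGetD mask i 0 ≠ PySem.List.pyGetD mask (i - 1) 0)) (PySem.List.pyRange (k + 1) n 1)) ++ [n] = k :: (List.filter (fun i => decide (PySem.List.pyGetD mask i 0 ≠ PySem.List.pyGetD mask (i - 1) 0)) (PySem.List.pyRange (k + 1) n 1) ++ [n]) from rfl]
        rw [pvPairs_cons_cons, hcs]
        simp

-- ===== VERDICT (by name: the statement is the Claim_ definition above) =====
theorem find_turn_boundaries_py_spec : Claim_equal_find_turn_boundaries_py := by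
  intro mask _
  unfold Spec_find_turn_boundaries_py find_turn_boundaries_py find_turn_boundaries_py_alt
  by_cases hm : mask = []
  · simp [hm]
  · simp only [if_neg hm]
    have h := pvMain mask (mask.length : Int) (Int.toNat ((mask.length : Int) - 1))
      1 0 (PySem.List.pyGetD mask 0 0) [] (by omega) rfl (by norm_num)
    simpa [pvPairs] using h
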